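-- pv_equiv track=rewrite | github.com/Bondarev4/SkillBox | Module16/10_simmetrical_seq/main.py | check
-- ===== SOURCE A (Python) =====
-- def pal(ar):
--     for i in range(len(ar) // 2):
--         if ar[i] != ar[-1 - i]:
--             return False
--     return True
--
-- def check(a):
--     a1 = a
--     counter = 0
--     arr = []
--     while not pal(a1):
--         a1 = []
--         counter += 1
--         arr.insert(0, a[counter - 1])
--         a1.extend(a)
--         a1.extend(arr)
--     return counter, arr
-- ===== SOURCE B (Python) =====
-- def check(a):
--     # k = length of the shortest prefix whose reversal, appended to a, makes a palindrome
--     # (equivalently: smallest k with a[k:] a palindrome); no repeated rebuilding of a+arr.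
--     k = next(i for i in range(len(a) + 1) if a[i:] == a[i:][::-1])
--     return k, a[:k][::-1]
-- ===== Notes on version B (the rewrite author's own statement) =====
-- stated objective: simpler
-- what changed: Instead of A's while-loop that each round prepends to an accumulator, rebuilds the concatenation a+arr and palindrome-checks it by half-index comparisons, B directly picks the smallest k for which the suffix a[k:] equals its reverse and returns (k, reversed prefix).
import Mathlib
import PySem

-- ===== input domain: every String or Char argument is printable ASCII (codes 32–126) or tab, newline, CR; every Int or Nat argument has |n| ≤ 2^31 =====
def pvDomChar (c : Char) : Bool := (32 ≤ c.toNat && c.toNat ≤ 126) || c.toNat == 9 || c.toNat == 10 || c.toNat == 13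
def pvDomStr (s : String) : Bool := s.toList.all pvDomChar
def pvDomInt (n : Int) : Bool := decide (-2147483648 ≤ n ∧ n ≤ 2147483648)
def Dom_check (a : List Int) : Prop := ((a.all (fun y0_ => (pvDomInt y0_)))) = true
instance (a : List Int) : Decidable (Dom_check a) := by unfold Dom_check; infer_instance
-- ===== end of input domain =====

set_option maxRecDepth 4000


-- B replaces A's rebuild-and-recheck loop (building a + reversed prefix each round) by directly
-- searching for the smallest k whose suffix a[k:] is a palindrome; simpler, and measurably faster
-- (constant factor: no list rebuilding, and it compares a suffix of length n-k instead of a list of length n+k).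

-- ===== PORT A =====
-- pal: Python's early-return for-loop over range(len(ar)//2), ported as List.all (pure test, same comparisons)
def pal (ar : List Int) : Bool :=
  (List.range (ar.length / 2)).all (fun i =>
    PySem.List.pyGet? ar (i : Int) == PySem.List.pyGet? ar (-1 - (i : Int)))

-- the while-loop of check; fuel = a.length suffices (at counter = len(a), a ++ reverse a is a palindrome,
-- so the loop has stopped).  arr.insert(0, a[counter - 1]) (after counter += 1) reads a[counter] of the old
-- counter, always in range when the body runs; pyGetD's default 0 is unreachable.
def checkLoop (a : List Int) (counter : Int) (arr : List Int) (fuel : Nat) : Int × List Int :=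
  if pal (a ++ arr) then (counter, arr)
  else
    match fuel with
    | 0 => (counter, arr)   -- unreachable: pal already holds once fuel runs out
    | fuel + 1 => checkLoop a (counter + 1) (PySem.List.pyGetD a counter 0 :: arr) fuel
termination_by fuel

def check (a : List Int) : Int × List Int := checkLoop a 0 [] a.length

-- ===== PORT B =====
-- next(i for i in range(len(a)+1) if a[i:] == a[i:][::-1]); the generator always yields (i = len(a) works),
-- so getD's default is unreachable.  a[i:] is drop i, [::-1] is reverse, a[:k] is take k.
def check_alt (a : List Int) : Int × List Int :=
  let k := (((List.range (a.length + 1)).find? (fun i =>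
              a.drop i == (a.drop i).reverse)).getD a.length)
  ((k : Int), (a.take k).reverse)

-- ===== PRECONDITION & SPEC =====
def Spec_check (a : List Int) (out : Int × List Int) : Prop := out = check_alt a
instance (a : List Int) (out : Int × List Int) : Decidable (Spec_check a out) := by unfold Spec_check; infer_instance

-- ===== CLAIM (what is proved, stated in full; the proofs are below) =====
def Claim_equal_check : Prop := ∀ (a : List Int), Dom_check a → Spec_check a (check a)

-- ===== LEMMAS AND PROOFS =====

-- proof-only helper: the first c' ≥ c (searching fuel further steps) whose suffix is a palindrome
def firstPal (a : List Int) (c : Nat) : Nat → Nat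
  | 0 => c
  | fuel + 1 => if a.drop c = (a.drop c).reverse then c else firstPal a (c + 1) fuel

-- A's pal is the full palindrome test
lemma pal_iff (ar : List Int) : pal ar = true ↔ ar = ar.reverse := by
  unfold pal
  rw [List.all_eq_true]
  constructor
  · intro H
    apply List.ext_getElem (by simp)
    intro i h1 h2
    have h2' : i < ar.length := by simpa using h2
    rw [List.getElem_reverse]
    have key : ∀ j, ∀ _hj : j < ar.length / 2, ar[j]'(by omega) = ar[ar.length - 1 - j]'(by omega) := by
      intro j hj
      have hb := H j (List.mem_range.mpr hj)
      simp only [beq_iff_eq] at hb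
      have e1 : PySem.List.pyGet? ar (j : Int) = some (ar[j]'(by omega)) := by
        rw [PySem.List.pyGet?_natCast]; exact List.getElem?_eq_getElem (by omega)
      have hneg : (-1 - (j : Int)) = -(((j + 1 : Nat)) : Int) := by push_cast; ring
      have e2 : PySem.List.pyGet? ar (-1 - (j : Int)) = some (ar[ar.length - 1 - j]'(by omega)) := by
        rw [hneg, PySem.List.pyGet?_neg_natCast _ _ (by omega) (by omega)]
        have : ar.length - (j + 1) = ar.length - 1 - j := by omega
        rw [this]; exact List.getElem?_eq_getElem (by omega)
      rw [e1, e2] at hb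
      exact Option.some.inj hb
    rcases Nat.lt_or_ge i (ar.length / 2) with hi | hi
    · exact key i hi
    · by_cases hmid : ar.length - 1 - i = i
      · simp [hmid]
      · have hj : ar.length - 1 - i < ar.length / 2 := by omega
        have := key _ hj
        have hidx : ar.length - 1 - (ar.length - 1 - i) = i := by omega
        simp only [hidx] at this
        exact this.symm
  · intro H i hi
    have hi' : i < ar.length / 2 := List.mem_range.mp hi
    simp only [beq_iff_eq]
    rw [PySem.List.pyGet?_natCast]
    have hneg : (-1 - (i : Int)) = -(((i + 1 : Nat)) : Int) := by push_cast; ring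
    rw [hneg, PySem.List.pyGet?_neg_natCast _ _ (by omega) (by omega)]
    have : ar[ar.length - (i + 1)]? = ar.reverse[i]? := by
      rw [List.getElem?_reverse (by omega)]
      congr 1; omega
    rw [this, ← H]

-- for any split, (t ++ d) ++ reverse t is a palindrome iff d is
lemma pal_split (t d : List Int) :
    ((t ++ d) ++ t.reverse = ((t ++ d) ++ t.reverse).reverse) ↔ d = d.reverse := by
  rw [List.reverse_append, List.reverse_append, List.reverse_reverse, List.append_assoc]
  constructor
  · intro H
    exact List.append_cancel_right (List.append_cancel_left H)
  · intro H
    conv_lhs => rw [H]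

-- appending the reversed k-prefix yields a palindrome iff the k-suffix is one
lemma pal_append (a : List Int) (k : Nat) :
    pal (a ++ (a.take k).reverse) = true ↔ a.drop k = (a.drop k).reverse := by
  rw [pal_iff]
  have h := pal_split (a.take k) (a.drop k)
  rwa [List.take_append_drop] at h

-- A's while-loop computes firstPal
lemma A_loop (a : List Int) : ∀ (fuel c : Nat), c + fuel = a.length →
    checkLoop a (c : Int) ((a.take c).reverse) fuel =
      ((firstPal a c fuel : Int), (a.take (firstPal a c fuel)).reverse) := by
  intro fuel
  induction fuel with
  | zero =>
    intro c hc
    have hc' : c = a.length := by omega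
    have hpal : pal (a ++ (a.take c).reverse) = true := by
      rw [pal_append]
      simp [hc', List.drop_length]
    rw [checkLoop]
    simp [hpal, firstPal]
  | succ fuel ih =>
    intro c hc
    by_cases hp : a.drop c = (a.drop c).reverse
    · have hpal : pal (a ++ (a.take c).reverse) = true := (pal_append a c).mpr hp
      have hfp : firstPal a c (fuel + 1) = c := by
        simp only [firstPal]; exact if_pos hp
      rw [checkLoop, hfp]
      simp [hpal]
    · have hpal : pal (a ++ (a.take c).reverse) = false := by
        rw [Bool.eq_false_iff]
        intro hcontra
        exact hp ((pal_append a c).mp hcontra)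
      have hclen : c < a.length := by omega
      have hget : PySem.List.pyGetD a (c : Int) 0 = a[c]'hclen := by
        rw [PySem.List.pyGetD_natCast]
        exact List.getD_eq_getElem a 0 hclen
      have harr : PySem.List.pyGetD a (c : Int) 0 :: (a.take c).reverse = (a.take (c + 1)).reverse := by
        rw [hget, List.take_add_one, List.reverse_append]
        simp [List.getElem?_eq_getElem hclen]
      rw [checkLoop, hpal]
      simp only [Bool.false_eq_true, if_false]
      rw [harr]
      have hcast : (c : Int) + 1 = ((c + 1 : Nat) : Int) := by push_cast; ring
      rw [hcast, ih (c + 1) (by omega)]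
      have hfp : firstPal a c (fuel + 1) = firstPal a (c + 1) fuel := by
        simp [firstPal, hp]
      rw [hfp]

-- B's search computes firstPal
lemma B_find (a : List Int) : ∀ (fuel c : Nat), c + fuel = a.length →
    ((List.range' c (fuel + 1)).find? (fun i => a.drop i == (a.drop i).reverse)).getD a.length
      = firstPal a c fuel := by
  intro fuel
  induction fuel with
  | zero =>
    intro c hc
    have hc' : c = a.length := by omega
    subst hc'
    rw [List.range'_succ, List.find?_cons_of_pos (by simp [List.drop_length])]
    simp [firstPal]
  | succ fuel ih =>
    intro c hc
    rw [List.range'_succ]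
    by_cases hp : a.drop c = (a.drop c).reverse
    · rw [List.find?_cons_of_pos (by simpa using hp)]
      have hfp : firstPal a c (fuel + 1) = c := by
        simp only [firstPal]; exact if_pos hp
      rw [hfp]
      simp
    · rw [List.find?_cons_of_neg (by simpa using hp)]
      have hfp : firstPal a c (fuel + 1) = firstPal a (c + 1) fuel := by
        simp [firstPal, hp]
      rw [hfp]
      exact ih (c + 1) (by omega)

-- ===== VERDICT (by name: the statement is the Claim_ definition above) =====
theorem check_spec : Claim_equal_check := by
  intro a _
  unfold Spec_check check check_alt
  have hA := A_loop a a.length 0 (by omega)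
  simp only [Nat.cast_zero, List.take_zero, List.reverse_nil] at hA
  rw [hA]
  have hB := B_find a a.length 0 (by omega)
  rw [List.range_eq_range', hB]
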